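-- pv_equiv track=rewrite | github.com/JIE-CHI/AOC | aoc2024/day02.py | check
-- ===== SOURCE A (Python) =====
-- def check(nums, part1 = True):
--     flag = None
--     for i in range(len(nums)-1):
--         if flag == None:
--             flag = (nums[i] > nums[i+1])
--         if 1 <= abs(nums[i] - nums[i+1]) <= 3 and (nums[i] > nums[i+1]) == flag:
--             pass
--         else:
--             if part1:
--                 return False
--             else:
--
--                 return check(nums[1:], part1=True) | check(nums[:i] + nums[i+1 :], part1=True) | check( nums[:i+1] + nums[i+2 :], part1=True)
--     return True
-- ===== SOURCE B (Python) =====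
-- def is_safe(seq):
--     if len(seq) <= 1:
--         return True
--     dirn = seq[0] > seq[1]
--     return all(1 <= abs(x - y) <= 3 and (x > y) == dirn
--                for x, y in zip(seq, seq[1:]))
--
-- def check(nums, part1=True):
--     if part1:
--         return is_safe(nums)
--     return is_safe(nums) or any(is_safe(nums[:j] + nums[j + 1:])
--                                 for j in range(len(nums)))
-- ===== Notes on version B (the rewrite author's own statement) =====
-- stated objective: simpler
-- what changed: Replaced A's stateful loop with first-failure three-candidate recursion by a plain linear is_safe scan plus, for part 2, an exhaustive brute-force dampener over removing every single index (provably equivalent to A's three targeted removals).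
import Mathlib
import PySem

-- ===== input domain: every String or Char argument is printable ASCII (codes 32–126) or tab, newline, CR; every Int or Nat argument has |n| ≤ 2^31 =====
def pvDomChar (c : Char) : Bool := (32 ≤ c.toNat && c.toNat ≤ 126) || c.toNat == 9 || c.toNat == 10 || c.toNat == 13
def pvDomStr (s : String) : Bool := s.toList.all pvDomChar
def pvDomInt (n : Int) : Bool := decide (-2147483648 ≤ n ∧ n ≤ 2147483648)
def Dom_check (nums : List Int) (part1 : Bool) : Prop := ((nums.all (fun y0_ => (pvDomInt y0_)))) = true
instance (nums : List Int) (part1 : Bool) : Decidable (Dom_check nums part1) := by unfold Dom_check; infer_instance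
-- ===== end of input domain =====

-- B replaces A's first-failure three-candidate dampener recursion by a linear is_safe scan
-- plus a brute-force try-removing-every-index dampener (simpler; proved to return the same value).

-- termination facts for checkAux (cited by name in decreasing_by)
theorem pvLenDrop1 (l : List Int) (h : 0 < l.length) : (l.drop 1).length < l.length := by
  rw [List.length_drop]; omega

theorem pvLenRm (l : List Int) (j : Nat) (hj : j < l.length) :
    (l.take j ++ l.drop (j + 1)).length < l.length := by
  rw [List.length_append, List.length_take, List.length_drop]; omega

-- ===== PORT A =====
-- The for-loop over i in range(len(nums)-1) with the mutable `flag`; the recursive calls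
-- check(..., part1=True) recurse on strictly shorter lists.  Slices nums[1:], nums[:i]+nums[i+1:],
-- nums[:i+1]+nums[i+2:] have nonnegative in-range bounds, so drop/take are exact.
def checkAux (nums : List Int) (part1 : Bool) (i : Nat) (flag : Option Bool) : Bool :=
  if h : i + 1 < nums.length then
    let a := nums[i]
    let b := nums[i+1]
    let f := match flag with
      | none => decide (a > b)     -- if flag == None: flag = (nums[i] > nums[i+1])
      | some f => f
    if (1 ≤ (a - b).natAbs ∧ (a - b).natAbs ≤ 3) ∧ decide (a > b) = f then
      checkAux nums part1 (i + 1) (some f)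
    else if part1 then
      false
    else
      checkAux (nums.drop 1) true 0 none
        || checkAux (nums.take i ++ nums.drop (i + 1)) true 0 none
        || checkAux (nums.take (i + 1) ++ nums.drop (i + 2)) true 0 none
  else true
termination_by (nums.length, nums.length - i)
decreasing_by
  · exact Prod.Lex.right _ (Nat.sub_lt_sub_left (Nat.lt_of_succ_lt h) (Nat.lt_succ_self i))
  · exact Prod.Lex.left _ _ (pvLenDrop1 nums (Nat.lt_of_le_of_lt (Nat.zero_le _) h))
  · exact Prod.Lex.left _ _ (pvLenRm nums i (Nat.lt_of_succ_lt h))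
  · exact Prod.Lex.left _ _ (pvLenRm nums (i + 1) h)

def check (nums : List Int) (part1 : Bool) : Bool := checkAux nums part1 0 none

-- ===== PORT B =====
-- is_safe: one linear scan over zip(seq, seq[1:]) against the direction of the first pair.
def isSafe (seq : List Int) : Bool :=
  match seq with
  | a :: b :: _ =>
    let dirn := decide (a > b)
    (seq.zip (seq.drop 1)).all (fun p =>
      (decide (1 ≤ (p.1 - p.2).natAbs) && decide ((p.1 - p.2).natAbs ≤ 3))
        && (decide (p.1 > p.2) == dirn))
  | _ => true          -- len(seq) <= 1

def check_alt (nums : List Int) (part1 : Bool) : Bool :=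
  if part1 then isSafe nums
  else isSafe nums
    || (List.range nums.length).any (fun j => isSafe (nums.take j ++ nums.drop (j + 1)))

-- ===== PRECONDITION & SPEC =====
def Spec_check (nums : List Int) (part1 : Bool) (out : Bool) : Prop := out = check_alt nums part1
instance (nums : List Int) (part1 : Bool) (out : Bool) : Decidable (Spec_check nums part1 out) := by unfold Spec_check; infer_instance

-- ===== CLAIM (what is proved, stated in full; the proofs are below) =====
def Claim_equal_check : Prop := ∀ (nums : List Int) (part1 : Bool), Dom_check nums part1 → Spec_check nums part1 (check nums part1)

-- ===== LEMMAS AND PROOFS =====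

-- one adjacent pair is acceptable for direction f
def pOk (f : Bool) (x y : Int) : Bool :=
  (decide (1 ≤ (x - y).natAbs) && decide ((x - y).natAbs ≤ 3)) && (decide (x > y) == f)

-- all adjacent pairs of l are acceptable for direction f
def tOk (f : Bool) : List Int → Bool
  | x :: y :: rest => pOk f x y && tOk f (y :: rest)
  | _ => true

theorem tOk_short (f : Bool) (l : List Int) (h : l.length ≤ 1) : tOk f l = true := by
  match l with
  | [] => rfl
  | [_] => rfl
  | _ :: _ :: _ => simp at h

theorem zip_all_eq_tOk (f : Bool) (l : List Int) :
    (l.zip (l.drop 1)).all (fun p =>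
      (decide (1 ≤ (p.1 - p.2).natAbs) && decide ((p.1 - p.2).natAbs ≤ 3))
        && (decide (p.1 > p.2) == f)) = tOk f l := by
  match l with
  | [] => rfl
  | [_] => rfl
  | a :: b :: r =>
    have ih := zip_all_eq_tOk f (b :: r)
    simp only [List.drop_succ_cons, List.drop_zero, List.zip_cons_cons, List.all_cons] at *
    rw [ih]; rfl

theorem pOk_true_iff (f : Bool) (x y : Int) :
    pOk f x y = true ↔ (1 ≤ (x - y).natAbs ∧ (x - y).natAbs ≤ 3) ∧ decide (x > y) = f := by
  simp [pOk, and_assoc]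

theorem isSafe_cons (a b : Int) (r : List Int) :
    isSafe (a :: b :: r) = tOk (decide (a > b)) (a :: b :: r) := by
  rw [show isSafe (a :: b :: r) = ((a :: b :: r).zip ((a :: b :: r).drop 1)).all (fun p =>
      (decide (1 ≤ (p.1 - p.2).natAbs) && decide ((p.1 - p.2).natAbs ≤ 3))
        && (decide (p.1 > p.2) == decide (a > b))) from rfl]
  exact zip_all_eq_tOk (decide (a > b)) (a :: b :: r)

theorem tOk_iff (f : Bool) (l : List Int) :
    tOk f l = true ↔ ∀ k, (h : k + 1 < l.length) → pOk f l[k] l[k+1] = true := by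
  match l with
  | [] => simp [tOk]
  | [x] => simp [tOk]
  | a :: b :: r =>
    rw [show tOk f (a :: b :: r) = (pOk f a b && tOk f (b :: r)) from rfl]
    rw [Bool.and_eq_true, tOk_iff f (b :: r)]
    constructor
    · rintro ⟨h0, hrest⟩ k hk
      match k with
      | 0 => exact h0
      | k + 1 =>
        have := hrest k (by simpa using hk)
        simpa using this
    · intro h
      refine ⟨h 0 (by simp), fun k hk => ?_⟩
      have := h (k + 1) (by simpa using hk)
      simpa using this

-- the head pair of drop
theorem drop_two (l : List Int) (i : Nat) (h : i + 1 < l.length) :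
    l.drop i = l[i] :: l[i+1] :: l.drop (i + 2) := by
  rw [List.drop_eq_getElem_cons (by omega), List.drop_eq_getElem_cons (by omega)]

-- drop (i+1) of the tail pair decomposition
theorem drop_two' (l : List Int) (i : Nat) (h : i + 1 < l.length) :
    l.drop (i + 1) = l[i+1] :: l.drop (i + 2) := by
  rw [List.drop_eq_getElem_cons (by omega)]

-- the loop with part1 = True and flag already set scans exactly the pairs from index i
theorem checkAux_true (l : List Int) (i : Nat) (f : Bool) :
    checkAux l true i (some f) = tOk f (l.drop i) := by
  rw [checkAux]
  by_cases h : i + 1 < l.length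
  · simp only [h, dif_pos]
    rw [drop_two l i h]
    rw [show tOk f (l[i] :: l[i+1] :: l.drop (i+2)) = (pOk f l[i] l[i+1] && tOk f (l[i+1] :: l.drop (i+2))) from rfl]
    rw [← drop_two' l i h, ← checkAux_true l (i + 1) f]
    by_cases hc : (1 ≤ (l[i] - l[i+1]).natAbs ∧ (l[i] - l[i+1]).natAbs ≤ 3) ∧ decide (l[i] > l[i+1]) = f
    · have hp : pOk f l[i] l[i+1] = true := (pOk_true_iff f _ _).2 hc
      simp [hc, hp]
    · have hp : pOk f l[i] l[i+1] = false := by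
        cases hpk : pOk f l[i] l[i+1] with
        | false => rfl
        | true => exact absurd ((pOk_true_iff f _ _).1 hpk) hc
      simp [hc, hp]
  · simp only [h, dif_neg, not_false_iff]
    rw [tOk_short f _ (by simp [List.length_drop]; omega)]
termination_by l.length - i
decreasing_by omega

theorem isSafe_eq_tOk (m : List Int) (h2 : 2 ≤ m.length) :
    isSafe m = tOk (decide (m[0]'(by omega) > m[1]'(by omega))) m := by
  match m, h2 with
  | a :: b :: r, _ => exact isSafe_cons a b r

-- A's loop with part1=True computes is_safe
theorem check_true_eq (l : List Int) : checkAux l true 0 none = isSafe l := by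
  match l with
  | [] => rw [checkAux]; rfl
  | [a] => rw [checkAux]; rfl
  | a :: b :: r =>
    rw [checkAux]
    have h : 0 + 1 < (a :: b :: r).length := by simp
    rw [dif_pos h]
    rw [isSafe_cons]
    rw [show tOk (decide (a > b)) (a :: b :: r)
        = (pOk (decide (a > b)) a b && tOk (decide (a > b)) (b :: r)) from rfl]
    by_cases hm : 1 ≤ (a - b).natAbs ∧ (a - b).natAbs ≤ 3
    · have hp : pOk (decide (a > b)) a b = true := (pOk_true_iff _ _ _).2 ⟨hm, rfl⟩
      have := checkAux_true (a :: b :: r) 1 (decide (a > b))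
      simp only [List.drop_succ_cons, List.drop_zero] at this
      simp [hm, hp, this]
    · have hp : pOk (decide (a > b)) a b = false := by
        cases hpk : pOk (decide (a > b)) a b with
        | false => rfl
        | true => exact absurd ((pOk_true_iff _ _ _).1 hpk).1 hm
      simp [hm, hp]

-- indexing after removing element j
theorem length_rm (l : List Int) (j : Nat) (hj : j < l.length) :
    (l.take j ++ l.drop (j + 1)).length = l.length - 1 := by
  simp [List.length_append, List.length_take, List.length_drop]; omega

theorem getElem_rm_lt (l : List Int) (j k : Nat) (hk : k < j) (hj : j < l.length)
    (h : k < (l.take j ++ l.drop (j + 1)).length) :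
    (l.take j ++ l.drop (j + 1))[k] = l[k]'(by omega) := by
  rw [List.getElem_append_left (by simp [List.length_take]; omega)]
  simp [List.getElem_take]

theorem getElem_rm_ge (l : List Int) (j k : Nat) (hk : j ≤ k) (hj : j < l.length)
    (hk1 : k + 1 < l.length)
    (h : k < (l.take j ++ l.drop (j + 1)).length) :
    (l.take j ++ l.drop (j + 1))[k] = l[k+1] := by
  rw [List.getElem_append_right (by simp [List.length_take]; omega)]
  rw [List.getElem_drop]
  congr 1
  simp [List.length_take]; omega

-- two consecutive clean steps in direction f compose to direction f
theorem dir_trans (f : Bool) (x y z : Int)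
    (h1 : pOk f x y = true) (h2 : pOk f y z = true) : decide (x > z) = f := by
  rcases (pOk_true_iff f x y).1 h1 with ⟨⟨ha1, _⟩, hd1⟩
  rcases (pOk_true_iff f y z).1 h2 with ⟨⟨ha2, _⟩, hd2⟩
  cases f with
  | true =>
    simp only [decide_eq_true_eq] at hd1 hd2 ⊢
    omega
  | false =>
    simp only [decide_eq_false_iff_not, not_lt] at hd1 hd2 ⊢
    omega

-- the heart of the equivalence: if the first failure of the scan is at pair (i, i+1),
-- removing any index other than 0, i, i+1 leaves a list that is not safe
theorem remove_still_bad (l : List Int) (f0 : Bool) (i j : Nat)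
    (hi : i + 1 < l.length)
    (hf0 : f0 = decide (l[0]'(by omega) > l[1]'(by omega)))
    (hpre : ∀ k, (hk : k < i) → pOk f0 (l[k]'(by omega)) (l[k+1]'(by omega)) = true)
    (hfail : pOk f0 l[i] l[i+1] = false)
    (hj : j < l.length) (hj0 : j ≠ 0) (hji : j ≠ i) (hji1 : j ≠ i + 1) :
    isSafe (l.take j ++ l.drop (j + 1)) = false := by
  have hlen3 : 3 ≤ l.length := by omega
  have hm : (l.take j ++ l.drop (j + 1)).length = l.length - 1 := length_rm l j hj
  have h2 : 2 ≤ (l.take j ++ l.drop (j + 1)).length := by omega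
  rw [isSafe_eq_tOk _ h2]
  have hm0 : (l.take j ++ l.drop (j + 1))[0]'(by omega) = l[0]'(by omega) :=
    getElem_rm_lt l j 0 (by omega) hj (by omega)
  have hg : decide ((l.take j ++ l.drop (j + 1))[0]'(by omega)
      > (l.take j ++ l.drop (j + 1))[1]'(by omega)) = f0 := by
    by_cases h1j : 1 < j
    · have hm1 : (l.take j ++ l.drop (j + 1))[1]'(by omega) = l[1]'(by omega) :=
        getElem_rm_lt l j 1 h1j hj (by omega)
      rw [hm0, hm1, hf0]
    · -- j = 1, hence i ≥ 2 and the first two steps of l go in direction f0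
      have hj1 : j = 1 := by omega
      have hi2 : 2 ≤ i := by omega
      have hm1 : (l.take j ++ l.drop (j + 1))[1]'(by omega) = l[1+1]'(by omega) :=
        getElem_rm_ge l j 1 (by omega) hj (by omega) (by omega)
      rw [hm0, hm1]
      exact dir_trans f0 _ _ _ (hpre 0 (by omega)) (hpre 1 (by omega))
  rw [hg]
  cases hs : tOk f0 (l.take j ++ l.drop (j + 1)) with
  | false => rfl
  | true =>
    exfalso
    by_cases hlt : j < i
    · -- the failing pair sits at position (i-1, i) of the shortened list
      have hp := (tOk_iff f0 _).1 hs (i - 1) (by omega)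
      have e1 : (l.take j ++ l.drop (j + 1))[i-1]'(by omega) = l[(i-1)+1] :=
        getElem_rm_ge l j (i - 1) (by omega) hj (by omega) (by omega)
      have e2 : (l.take j ++ l.drop (j + 1))[(i-1)+1]'(by omega) = l[(i-1)+1+1] :=
        getElem_rm_ge l j ((i - 1) + 1) (by omega) hj (by omega) (by omega)
      rw [e1, e2] at hp
      have ei : (i - 1) + 1 = i := by omega
      simp only [ei] at hp
      rw [hp] at hfail
      exact absurd hfail (by decide)
    · -- j > i+1: the failing pair is untouched at position (i, i+1)
      have hgt : i + 1 < j := by omega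
      have hp := (tOk_iff f0 _).1 hs i (by omega)
      have e1 : (l.take j ++ l.drop (j + 1))[i]'(by omega) = l[i]'(by omega) :=
        getElem_rm_lt l j i (by omega) hj (by omega)
      have e2 : (l.take j ++ l.drop (j + 1))[i+1]'(by omega) = l[i+1]'(by omega) :=
        getElem_rm_lt l j (i + 1) (by omega) hj (by omega)
      rw [e1, e2] at hp
      rw [hp] at hfail
      exact absurd hfail (by decide)

-- A's loop with part1=False, flag already set, prefix scanned clean: equals
-- "suffix clean or some single removal is safe"
theorem checkAux_false (l : List Int) (f0 : Bool) (i : Nat)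
    (h2 : 1 < l.length)
    (hf0 : f0 = decide (l[0]'(by omega) > l[1]'h2))
    (hpre : ∀ k, (hk : k < i) → (hk1 : k + 1 < l.length) → pOk f0 l[k] l[k+1] = true) :
    checkAux l false i (some f0) =
      (tOk f0 (l.drop i)
        || (List.range l.length).any (fun j => isSafe (l.take j ++ l.drop (j + 1)))) := by
  rw [checkAux]
  by_cases h : i + 1 < l.length
  · rw [dif_pos h]
    by_cases hc : (1 ≤ (l[i] - l[i+1]).natAbs ∧ (l[i] - l[i+1]).natAbs ≤ 3)
        ∧ decide (l[i] > l[i+1]) = f0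
    · have hp : pOk f0 l[i] l[i+1] = true := (pOk_true_iff f0 _ _).2 hc
      have ih := checkAux_false l f0 (i + 1) h2 hf0
        (fun k hk hk1 => by
          by_cases hki : k < i
          · exact hpre k hki hk1
          · have : k = i := by omega
            subst this; exact hp)
      rw [drop_two l i h]
      rw [show tOk f0 (l[i] :: l[i+1] :: l.drop (i+2))
          = (pOk f0 l[i] l[i+1] && tOk f0 (l[i+1] :: l.drop (i+2))) from rfl]
      rw [← drop_two' l i h]
      simp only [hc, hp, Bool.true_and]
      exact ih
    · have hp : pOk f0 l[i] l[i+1] = false := by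
        cases hpk : pOk f0 l[i] l[i+1] with
        | false => rfl
        | true => exact absurd ((pOk_true_iff f0 _ _).1 hpk) hc
      have htd : tOk f0 (l.drop i) = false := by
        rw [drop_two l i h]
        rw [show tOk f0 (l[i] :: l[i+1] :: l.drop (i+2))
            = (pOk f0 l[i] l[i+1] && tOk f0 (l[i+1] :: l.drop (i+2))) from rfl]
        rw [hp]; rfl
      simp only [hc, if_false, Bool.false_eq_true, htd, Bool.false_or]
      rw [check_true_eq, check_true_eq, check_true_eq]
      have hrm0 : l.drop 1 = l.take 0 ++ l.drop (0 + 1) := by simp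
      rw [hrm0]
      -- the three candidates are exactly the removals that can still succeed
      have key : ∀ j, j < l.length → j ≠ 0 → j ≠ i → j ≠ i + 1 →
          isSafe (l.take j ++ l.drop (j + 1)) = false := fun j hj hj0 hji hji1 =>
        remove_still_bad l f0 i j h hf0 (fun k hk => hpre k hk (by omega)) hp hj hj0 hji hji1
      cases hany : (List.range l.length).any (fun j => isSafe (l.take j ++ l.drop (j + 1))) with
      | true =>
        obtain ⟨j, hjm, hjs⟩ := List.any_eq_true.1 hany
        rw [List.mem_range] at hjm
        by_cases hj0 : j = 0
        · subst hj0; simp at hjs; simp [hjs]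
        · by_cases hji : j = i
          · subst hji; simp [hjs]
          · by_cases hji1 : j = i + 1
            · subst hji1; simp [hjs]
            · rw [key j hjm hj0 hji hji1] at hjs; exact absurd hjs (by simp)
      | false =>
        have hall := List.any_eq_false.1 hany
        have e0 := hall 0 (List.mem_range.2 (by omega))
        have ei := hall i (List.mem_range.2 (by omega))
        have ei1 := hall (i + 1) (List.mem_range.2 (by omega))
        simp only [Bool.not_eq_true] at e0 ei ei1
        rw [e0, ei, ei1]; rfl
  · rw [dif_neg h]
    rw [tOk_short f0 _ (by simp [List.length_drop]; omega)]
    rfl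
termination_by l.length - i
decreasing_by omega

-- at i = 0 the uninitialised flag is immediately set to the first-pair direction
theorem checkAux_none (l : List Int) (p : Bool) (h2 : 1 < l.length) :
    checkAux l p 0 none = checkAux l p 0 (some (decide (l[0]'(by omega) > l[1]'h2))) := by
  conv_lhs => rw [checkAux]
  conv_rhs => rw [checkAux]

theorem check_alt_false (l : List Int) :
    check_alt l false = (isSafe l
      || (List.range l.length).any (fun j => isSafe (l.take j ++ l.drop (j + 1)))) := rfl

-- ===== VERDICT (by name: the statement is the Claim_ definition above) =====
theorem check_spec : Claim_equal_check := by
  intro nums part1 _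
  show check nums part1 = check_alt nums part1
  cases part1 with
  | true => exact check_true_eq nums
  | false =>
    by_cases h2 : 1 < nums.length
    · rw [check, checkAux_none nums false h2]
      rw [checkAux_false nums _ 0 h2 rfl (by omega)]
      rw [check_alt_false, List.drop_zero]
      rw [isSafe_eq_tOk nums (by omega)]
    · match nums with
      | [] => rw [check, checkAux]; rfl
      | [a] => rw [check, checkAux]; rfl
      | a :: b :: r => exact absurd (by simp) h2
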